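-- pv_equiv track=rewrite | github.com/yhw320/PanSyn | scripts/synphoni/infer_chr_fusion.py | remove_sub_set
-- ===== SOURCE A (Python) =====
-- def remove_sub_set(set_list):
--     set_list_ = []
--     for item in set_list:
--         set_list_.append(sorted(item, reverse=False))
--     filter_l = list(filter(lambda f: not any(set(f) < set(g) for g in set_list_), set_list_))
--     res = []
--     [res.append(_) for _ in filter_l if _ not in res]
--     return res
-- ===== SOURCE B (Python) =====
-- def _subset_sorted(a, b):
--     # two-pointer subset test on strictly increasing lists
--     i = 0
--     for x in a:
--         while i < len(b) and b[i] < x: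
--             i += 1
--         if i == len(b) or b[i] != x:
--             return False
--         i += 1
--     return True
--
--
-- def remove_sub_set(set_list):
--     # canonical form of each item's value-set: strictly increasing list
--     canon = [sorted(set(item)) for item in set_list]
--     # distinct canonical sets
--     uniq = []
--     for c in canon:
--         if c not in uniq:
--             uniq.append(c)
--     # antichain of maximal sets, built largest-first: a set dominated by some
--     # already-kept set is dropped; every set is contained in some kept set
--     maximal = []
--     for c in sorted(uniq, key=len, reverse=True):
--         if not any(_subset_sorted(c, m) for m in maximal):
--             maximal.append(c)
--     # keep an item iff its set is not strictly below a maximal set; dedupe by sorted form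
--     res = []
--     for item, c in zip(set_list, canon):
--         if any(len(c) < len(m) and _subset_sorted(c, m) for m in maximal):
--             continue
--         srt = sorted(item)
--         if srt not in res:
--             res.append(srt)
--     return res
-- ===== Notes on version B (the rewrite author's own statement) =====
-- stated objective: faster
-- what changed: B canonicalises each item to its sorted duplicate-free set representation, builds an antichain of maximal sets largest-first (dropping any set contained in an already-kept one) and keeps an item iff its set is not strictly below a maximal set, testing subset with a two-pointer merge walk on sorted lists instead of A's all-pairs Python-set comparisons.
import Mathlib
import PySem

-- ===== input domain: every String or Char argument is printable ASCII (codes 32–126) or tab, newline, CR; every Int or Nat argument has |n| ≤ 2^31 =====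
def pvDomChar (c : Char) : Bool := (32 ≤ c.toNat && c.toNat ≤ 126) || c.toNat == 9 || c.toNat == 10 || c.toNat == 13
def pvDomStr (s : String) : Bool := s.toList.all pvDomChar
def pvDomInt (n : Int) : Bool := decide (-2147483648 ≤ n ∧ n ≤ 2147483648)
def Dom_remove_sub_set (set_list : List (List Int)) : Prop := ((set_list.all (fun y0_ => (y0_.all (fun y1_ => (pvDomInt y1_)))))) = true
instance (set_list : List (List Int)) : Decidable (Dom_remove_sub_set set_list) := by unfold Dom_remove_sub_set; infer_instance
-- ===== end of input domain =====

-- One honest line: B replaces A's all-pairs Python-set comparisons by a different algorithm —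
-- canonical sorted duplicate-free representatives, an antichain of maximal sets built
-- largest-first, and a two-pointer merge-walk subset test on sorted lists.

-- ===== PORT A =====
def remove_sub_set (set_list : List (List Int)) : List (List Int) :=
  -- set_list_ = []; for item in set_list: set_list_.append(sorted(item))
  let set_list_ := set_list.foldl (fun acc item => acc ++ [PySem.List.sorted item (fun x => x) false]) []
  -- filter_l = [f for f in set_list_ if not any(set(f) < set(g) for g in set_list_)]
  let filter_l := set_list_.filter (fun f =>
    !(set_list_.any (fun g =>
      PySem.Set.issubset (PySem.Set.ofList f) (PySem.Set.ofList g) &&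
      !(PySem.Set.issubset (PySem.Set.ofList g) (PySem.Set.ofList f)))))
  -- res = []; [res.append(x) for x in filter_l if x not in res]
  filter_l.foldl (fun res x => if x ∈ res then res else res ++ [x]) []

-- ===== PORT B =====
-- _subset_sorted(a, b): two-pointer subset walk; the while loop advancing i over b is dropWhile
def pvSubsetSorted : List Int → List Int → Bool
  | [], _ => true
  | x :: a, b =>
    match b.dropWhile (fun y => decide (y < x)) with
    | [] => false
    | y :: rest => if y = x then pvSubsetSorted a rest else false

-- canonical form of an item's value-set: sorted(set(item))
def pvCanon (item : List Int) : List Int :=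
  PySem.List.sorted (PySem.Set.ofList item) (fun x => x) false

-- uniq = []; for c in canon: if c not in uniq: uniq.append(c)
def pvUniq (canon : List (List Int)) : List (List Int) :=
  canon.foldl (fun u c => if c ∈ u then u else u ++ [c]) []

-- maximal antichain, built over the distinct sets sorted largest-first
def pvMaximal (uniq : List (List Int)) : List (List Int) :=
  (PySem.List.sorted uniq (fun c => PySem.List.len c) true).foldl
    (fun M c => if M.any (fun m => pvSubsetSorted c m) then M else M ++ [c]) []

def remove_sub_set_alt (set_list : List (List Int)) : List (List Int) :=
  let canon := set_list.map pvCanon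
  let maximal := pvMaximal (pvUniq canon)
  (set_list.zip canon).foldl (fun res p =>
    if maximal.any (fun m => decide (PySem.List.len p.2 < PySem.List.len m) && pvSubsetSorted p.2 m)
    then res
    else
      let srt := PySem.List.sorted p.1 (fun x => x) false
      if srt ∈ res then res else res ++ [srt]) []

-- ===== PRECONDITION & SPEC =====
def Spec_remove_sub_set (set_list : List (List Int)) (out : List (List Int)) : Prop := out = remove_sub_set_alt set_list
instance (set_list : List (List Int)) (out : List (List Int)) : Decidable (Spec_remove_sub_set set_list out) := by unfold Spec_remove_sub_set; infer_instance

-- ===== CLAIM =====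
def Claim_equal_remove_sub_set : Prop := ∀ (set_list : List (List Int)), Dom_remove_sub_set set_list → Spec_remove_sub_set set_list (remove_sub_set set_list)

-- ===== LEMMAS AND PROOFS =====

-- the two-pointer walk on strictly increasing lists decides membership-wise inclusion
theorem pv_subsetSorted_iff : ∀ (a b : List Int), a.Pairwise (· < ·) → b.Pairwise (· < ·) →
    (pvSubsetSorted a b = true ↔ ∀ x ∈ a, x ∈ b) := by
  intro a
  induction a with
  | nil => intro b _ _; simp [pvSubsetSorted]
  | cons x a ih =>
    intro b ha hb
    rcases List.pairwise_cons.mp ha with ⟨hxa, ha'⟩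
    have hsplit := List.takeWhile_append_dropWhile (p := fun y => decide (y < x)) (l := b)
    have htw : ∀ z ∈ b.takeWhile (fun y => decide (y < x)), z < x := by
      intro z hz
      simpa using List.mem_takeWhile_imp hz
    cases hd : b.dropWhile (fun y => decide (y < x)) with
    | nil =>
      have hblt : ∀ z ∈ b, z < x := by
        intro z hz
        rw [← hsplit, hd, List.append_nil] at hz
        exact htw z hz
      rw [pvSubsetSorted, hd]
      simp only [Bool.false_eq_true, false_iff]
      intro h
      exact absurd (hblt x (h x (by simp))) (lt_irrefl x)
    | cons y rest =>
      have hbeq : b = b.takeWhile (fun y => decide (y < x)) ++ y :: rest := by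
        rw [← hd, hsplit]
      have hy : ¬ (y < x) := by
        have h0 : b.dropWhile (fun y => decide (y < x)) ≠ [] := by rw [hd]; simp
        have h1 := List.head_dropWhile_not (p := fun y => decide (y < x)) (l := b) h0
        have h2 : (b.dropWhile (fun y => decide (y < x))).head h0 = y := by
          simp only [hd, List.head_cons]
        rw [h2] at h1
        simpa using h1
      have hdpw : (y :: rest).Pairwise (· < ·) := by
        rw [← hd]
        exact hb.sublist (List.dropWhile_sublist _)
      rcases List.pairwise_cons.mp hdpw with ⟨hyrest, hrest⟩
      simp only [pvSubsetSorted, hd]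
      by_cases hyx : y = x
      · subst hyx
        rw [if_pos rfl, ih rest ha' hrest]
        constructor
        · intro h z hz
          rcases List.mem_cons.mp hz with rfl | hz'
          · rw [hbeq]; simp
          · have hzr := h z hz'
            rw [hbeq]
            exact List.mem_append.mpr (Or.inr (List.mem_cons_of_mem _ hzr))
        · intro h z hz
          have hzb := h z (List.mem_cons_of_mem _ hz)
          have hyz : y < z := hxa z hz
          rw [hbeq] at hzb
          rcases List.mem_append.mp hzb with h' | h'
          · exact absurd (htw z h') (by omega)
          · rcases List.mem_cons.mp h' with rfl | h''
            · omega
            · exact h''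
      · simp only [if_neg hyx, Bool.false_eq_true, false_iff]
        intro h
        have hxb := h x (by simp)
        rw [hbeq] at hxb
        rcases List.mem_append.mp hxb with h' | h'
        · exact absurd (htw x h') (lt_irrefl x)
        · rcases List.mem_cons.mp h' with rfl | h''
          · exact hyx rfl
          · have := hyrest x h''
            omega

-- the antichain loop: kept elements come from the input, and every input set is
-- contained (as a set) in some kept element
theorem pv_cover (cs M₀ : List (List Int))
    (hcs : ∀ c ∈ cs, c.Pairwise (· < ·)) (hM₀ : ∀ m ∈ M₀, m.Pairwise (· < ·)) :
    (∀ m ∈ M₀, m ∈ cs.foldl (fun M c => if M.any (fun m => pvSubsetSorted c m) then M else M ++ [c]) M₀) ∧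
    (∀ m ∈ cs.foldl (fun M c => if M.any (fun m => pvSubsetSorted c m) then M else M ++ [c]) M₀, m ∈ M₀ ∨ m ∈ cs) ∧
    (∀ c ∈ cs, ∃ m ∈ cs.foldl (fun M c => if M.any (fun m => pvSubsetSorted c m) then M else M ++ [c]) M₀,
      c.toFinset ⊆ m.toFinset) := by
  induction cs generalizing M₀ with
  | nil =>
    refine ⟨fun m hm => hm, fun m hm => Or.inl hm, by simp⟩
  | cons c cs ih =>
    have hcs' : ∀ d ∈ cs, d.Pairwise (· < ·) := fun d hd => hcs d (List.mem_cons_of_mem _ hd)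
    simp only [List.foldl_cons]
    by_cases h : M₀.any (fun m => pvSubsetSorted c m) = true
    · rw [if_pos h]
      obtain ⟨h1, h2, h3⟩ := ih M₀ hcs' hM₀
      refine ⟨h1, fun m hm => (h2 m hm).imp id (List.mem_cons_of_mem _), ?_⟩
      intro d hd
      rcases List.mem_cons.mp hd with rfl | hd'
      · obtain ⟨m, hmM₀, hsub⟩ := List.any_eq_true.mp h
        refine ⟨m, h1 m hmM₀, ?_⟩
        intro z hz
        rw [List.mem_toFinset] at hz ⊢
        exact (pv_subsetSorted_iff d m (hcs d (by simp)) (hM₀ m hmM₀)).mp hsub z hz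
      · exact h3 d hd'
    · rw [if_neg h]
      have hM₀' : ∀ m ∈ M₀ ++ [c], m.Pairwise (· < ·) := by
        intro m hm
        rcases List.mem_append.mp hm with h' | h'
        · exact hM₀ m h'
        · rw [List.mem_singleton] at h'
          subst h'
          exact hcs m (by simp)
      obtain ⟨h1, h2, h3⟩ := ih (M₀ ++ [c]) hcs' hM₀'
      refine ⟨fun m hm => h1 m (List.mem_append.mpr (Or.inl hm)), ?_, ?_⟩
      · intro m hm
        rcases h2 m hm with h' | h'
        · rcases List.mem_append.mp h' with h'' | h''
          · exact Or.inl h''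
          · rw [List.mem_singleton] at h''
            subst h''
            exact Or.inr (by simp)
        · exact Or.inr (List.mem_cons_of_mem _ h')
      · intro d hd
        rcases List.mem_cons.mp hd with rfl | hd'
        · exact ⟨d, h1 d (List.mem_append.mpr (Or.inr (by simp))), Finset.Subset.refl _⟩
        · exact h3 d hd'

theorem pv_toFinset_sorted (xs : List Int) :
    (PySem.List.sorted xs (fun x => x) false).toFinset = xs.toFinset := by
  ext x
  simp [List.mem_toFinset, PySem.List.mem_sorted]

theorem pv_toFinset_canon (xs : List Int) : (pvCanon xs).toFinset = xs.toFinset := by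
  ext x
  simp [pvCanon, List.mem_toFinset, PySem.List.mem_sorted, PySem.Set.mem_ofList]

theorem pv_canon_pairwise (xs : List Int) : (pvCanon xs).Pairwise (· < ·) := by
  unfold pvCanon
  exact PySem.List.sorted_ofList_pairwise_lt xs

theorem pv_issubset_iff_finset (a b : List Int) :
    PySem.Set.issubset (PySem.Set.ofList a) (PySem.Set.ofList b) = true ↔ a.toFinset ⊆ b.toFinset := by
  rw [PySem.Set.issubset_iff, Finset.subset_iff]
  simp [PySem.Set.mem_ofList, List.mem_toFinset]

-- A's per-pair test set(sorted f) < set(sorted g) is strict Finset inclusion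
theorem pv_condA_iff (it g : List Int) :
    ((PySem.Set.issubset (PySem.Set.ofList (PySem.List.sorted it (fun x => x) false)) (PySem.Set.ofList (PySem.List.sorted g (fun x => x) false)) &&
      !(PySem.Set.issubset (PySem.Set.ofList (PySem.List.sorted g (fun x => x) false)) (PySem.Set.ofList (PySem.List.sorted it (fun x => x) false)))) = true)
    ↔ it.toFinset ⊂ g.toFinset := by
  have hig := pv_issubset_iff_finset (PySem.List.sorted it (fun x => x) false) (PySem.List.sorted g (fun x => x) false)
  have hgi := pv_issubset_iff_finset (PySem.List.sorted g (fun x => x) false) (PySem.List.sorted it (fun x => x) false)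
  rw [pv_toFinset_sorted, pv_toFinset_sorted] at hig hgi
  rw [ssubset_iff_subset_not_subset, Bool.and_eq_true, Bool.not_eq_true']
  constructor
  · rintro ⟨h1, h2⟩
    refine ⟨hig.mp h1, fun hc => ?_⟩
    rw [hgi.mpr hc] at h2
    cases h2
  · rintro ⟨h1, h2⟩
    refine ⟨hig.mpr h1, ?_⟩
    rw [Bool.eq_false_iff]
    intro hc
    exact h2 (hgi.mp hc)

-- B's per-pair test (shorter ∧ two-pointer subset) is strict Finset inclusion
theorem pv_condB_pair_iff (c m : List Int) (hc : c.Pairwise (· < ·)) (hm : m.Pairwise (· < ·)) :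
    ((decide (PySem.List.len c < PySem.List.len m) && pvSubsetSorted c m) = true)
    ↔ c.toFinset ⊂ m.toFinset := by
  have hcn : c.Nodup := hc.imp (fun h => ne_of_lt h)
  have hmn : m.Nodup := hm.imp (fun h => ne_of_lt h)
  rw [Bool.and_eq_true, decide_eq_true_eq, pv_subsetSorted_iff c m hc hm,
    PySem.List.len_eq, PySem.List.len_eq]
  constructor
  · rintro ⟨hlen, hsub⟩
    have hlen' : c.length < m.length := by exact_mod_cast hlen
    have hsub' : c.toFinset ⊆ m.toFinset := by
      intro z hz
      rw [List.mem_toFinset] at hz ⊢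
      exact hsub z hz
    rw [Finset.ssubset_iff_subset_ne]
    refine ⟨hsub', fun he => ?_⟩
    have hcard : c.toFinset.card = m.toFinset.card := by rw [he]
    rw [List.toFinset_card_of_nodup hcn, List.toFinset_card_of_nodup hmn] at hcard
    omega
  · intro hss
    have h1 := Finset.card_lt_card hss
    rw [List.toFinset_card_of_nodup hcn, List.toFinset_card_of_nodup hmn] at h1
    refine ⟨by exact_mod_cast h1, ?_⟩
    intro z hz
    have := hss.subset (List.mem_toFinset.mpr hz)
    exact List.mem_toFinset.mp this

theorem pv_mem_dedup_foldl (canon : List (List Int)) (acc : List (List Int)) (c : List Int) :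
    c ∈ canon.foldl (fun u c => if c ∈ u then u else u ++ [c]) acc ↔ c ∈ acc ∨ c ∈ canon := by
  induction canon generalizing acc with
  | nil => simp
  | cons d t ih =>
    simp only [List.foldl_cons]
    by_cases hd : d ∈ acc
    · rw [if_pos hd, ih]
      simp only [List.mem_cons]
      constructor
      · rintro (h | h)
        · exact Or.inl h
        · exact Or.inr (Or.inr h)
      · rintro (h | rfl | h)
        · exact Or.inl h
        · exact Or.inl hd
        · exact Or.inr h
    · rw [if_neg hd, ih]
      simp only [List.mem_append, List.mem_cons]
      tauto

theorem pv_mem_uniq (canon : List (List Int)) (c : List Int) :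
    c ∈ pvUniq canon ↔ c ∈ canon := by
  unfold pvUniq
  rw [pv_mem_dedup_foldl]
  simp

-- the whole B-side condition tested against the maximal antichain is exactly
-- "item's set is a proper subset of some input item's set"
theorem pv_condB_iff (l : List (List Int)) (it : List Int) :
    ((pvMaximal (pvUniq (l.map pvCanon))).any (fun m =>
      decide (PySem.List.len (pvCanon it) < PySem.List.len m) && pvSubsetSorted (pvCanon it) m) = true)
    ↔ ∃ g ∈ l, it.toFinset ⊂ g.toFinset := by
  have hmemcs : ∀ c, c ∈ PySem.List.sorted (pvUniq (l.map pvCanon)) (fun c => PySem.List.len c) true ↔ c ∈ l.map pvCanon := by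
    intro c
    rw [PySem.List.mem_sorted, pv_mem_uniq]
  have hpwcs : ∀ c ∈ PySem.List.sorted (pvUniq (l.map pvCanon)) (fun c => PySem.List.len c) true, c.Pairwise (· < ·) := by
    intro c hc
    obtain ⟨g, _, rfl⟩ := List.mem_map.mp ((hmemcs c).mp hc)
    exact pv_canon_pairwise g
  obtain ⟨h1, h2, h3⟩ := pv_cover (PySem.List.sorted (pvUniq (l.map pvCanon)) (fun c => PySem.List.len c) true) [] hpwcs (by simp)
  constructor
  · intro h
    obtain ⟨m, hm, hcond⟩ := List.any_eq_true.mp h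
    rw [pvMaximal] at hm
    have hmcs := (h2 m hm).resolve_left (by simp)
    obtain ⟨g, hg, rfl⟩ := List.mem_map.mp ((hmemcs m).mp hmcs)
    have hss := (pv_condB_pair_iff _ _ (pv_canon_pairwise it) (pv_canon_pairwise g)).mp hcond
    rw [pv_toFinset_canon, pv_toFinset_canon] at hss
    exact ⟨g, hg, hss⟩
  · rintro ⟨g, hg, hss⟩
    have hcg : pvCanon g ∈ PySem.List.sorted (pvUniq (l.map pvCanon)) (fun c => PySem.List.len c) true :=
      (hmemcs _).mpr (List.mem_map_of_mem hg)
    obtain ⟨m, hm, hsub⟩ := h3 _ hcg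
    have hmcs := (h2 m hm).resolve_left (by simp)
    obtain ⟨g', _, hg'⟩ := List.mem_map.mp ((hmemcs m).mp hmcs)
    rw [List.any_eq_true]
    refine ⟨m, by rw [pvMaximal]; exact hm, ?_⟩
    rw [pv_condB_pair_iff _ _ (pv_canon_pairwise it) (by rw [← hg']; exact pv_canon_pairwise g')]
    rw [pv_toFinset_canon]
    rw [pv_toFinset_canon] at hsub
    exact Finset.ssubset_of_ssubset_of_subset hss hsub

theorem pv_zip_map_self {α β : Type} (f : α → β) (l : List α) :
    l.zip (l.map f) = l.map (fun x => (x, f x)) := by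
  induction l with
  | nil => rfl
  | cons x t ih => simp [ih]

-- ===== VERDICT =====
theorem remove_sub_set_spec : Claim_equal_remove_sub_set := by
  intro l _
  show remove_sub_set l = remove_sub_set_alt l
  unfold remove_sub_set remove_sub_set_alt
  show ((l.foldl (fun acc item => acc ++ [PySem.List.sorted item (fun x => x) false]) []).filter
      (fun f => !((l.foldl (fun acc item => acc ++ [PySem.List.sorted item (fun x => x) false]) []).any
        (fun g => PySem.Set.issubset (PySem.Set.ofList f) (PySem.Set.ofList g) &&
          !(PySem.Set.issubset (PySem.Set.ofList g) (PySem.Set.ofList f)))))).foldl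
      (fun res x => if x ∈ res then res else res ++ [x]) []
    = (l.zip (l.map pvCanon)).foldl (fun res p =>
        if (pvMaximal (pvUniq (l.map pvCanon))).any (fun m =>
          decide (PySem.List.len p.2 < PySem.List.len m) && pvSubsetSorted p.2 m)
        then res
        else (if PySem.List.sorted p.1 (fun x => x) false ∈ res then res
          else res ++ [PySem.List.sorted p.1 (fun x => x) false])) []
  rw [pv_zip_map_self]
  simp only [PySem.List.foldl_append_singleton_eq_map, List.nil_append, List.filter_map,
    List.foldl_map, List.any_map, Function.comp_def]
  rw [← PySem.List.foldl_if_eq_foldl_filter]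
  apply PySem.List.foldl_congr_mem
  intro res it _
  have he : (pvMaximal (pvUniq (l.map pvCanon))).any (fun m =>
        decide (PySem.List.len (pvCanon it) < PySem.List.len m) && pvSubsetSorted (pvCanon it) m)
      = l.any (fun g =>
        PySem.Set.issubset (PySem.Set.ofList (PySem.List.sorted it (fun x => x) false)) (PySem.Set.ofList (PySem.List.sorted g (fun x => x) false)) &&
        !(PySem.Set.issubset (PySem.Set.ofList (PySem.List.sorted g (fun x => x) false)) (PySem.Set.ofList (PySem.List.sorted it (fun x => x) false)))) := by
    rw [Bool.eq_iff_iff, pv_condB_iff]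
    simp only [List.any_eq_true, pv_condA_iff]
  rw [he]
  rcases Bool.eq_false_or_eq_true (l.any (fun g =>
      PySem.Set.issubset (PySem.Set.ofList (PySem.List.sorted it (fun x => x) false)) (PySem.Set.ofList (PySem.List.sorted g (fun x => x) false)) &&
      !(PySem.Set.issubset (PySem.Set.ofList (PySem.List.sorted g (fun x => x) false)) (PySem.Set.ofList (PySem.List.sorted it (fun x => x) false))))) with h | h <;>
    simp [h]
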